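-- pv_equiv track=rewrite | github.com/mcsilla/err-corr | package_root/correction/correction_dataset_generator.py | correct_tokens_with_tokenized_PAD
-- ===== SOURCE A (Python) =====
-- def correct_tokens_with_tokenized_PAD(tokenized_chars):
--     corrected_chars = []
--     i = 0
--     # az "[" csak a "[PAD]"-nál szerepelhet az ocr_errors.txt-ben!
--     last_pad = False
--     while i < len(tokenized_chars):
--         next_char = tokenized_chars[i]
--         if next_char == "[":
--             corrected_chars.append("[PAD]")
--             i += 5
--             last_pad = True
--             if i < len(tokenized_chars) and tokenized_chars[i] == "|":
--                 last_pad = False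
--                 i += 1
--         elif last_pad == True:
--             corrected_chars.append("##" + next_char)
--             last_pad = False
--             i += 1
--         else:
--             corrected_chars.append(next_char)
--             i += 1
--     return corrected_chars
-- ===== SOURCE B (Python) =====
-- def correct_tokens_with_tokenized_PAD(tokenized_chars):
--     # Chunked rewriting: repeatedly find the next "[" marker, copy the plain
--     # chunk before it wholesale, emit "[PAD]", and resolve the block's follower
--     # ('|' separator dropped, non-'[' follower becomes a '##' continuation).
--     out = []
--     rest = tokenized_chars
--     while "[" in rest:
--         k = rest.index("[")
--         out.extend(rest[:k])
--         out.append("[PAD]")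
--         tail = rest[k + 5:]
--         if tail and tail[0] == "|":
--             rest = tail[1:]
--         elif tail and tail[0] != "[":
--             out.append("##" + tail[0])
--             rest = tail[1:]
--         else:
--             rest = tail
--     out.extend(rest)
--     return out
-- ===== Notes on version B (the rewrite author's own statement) =====
-- stated objective: alternative
-- what changed: Replaces A's token-by-token scan with its cross-iteration last_pad flag by chunked rewriting: repeatedly locate the next '[' marker with list.index, copy the whole plain chunk before it via slicing/extend, emit '[PAD]' and resolve the block's follower ('|' separator or '##' continuation) locally, keeping no state between chunks.
import Mathlib
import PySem

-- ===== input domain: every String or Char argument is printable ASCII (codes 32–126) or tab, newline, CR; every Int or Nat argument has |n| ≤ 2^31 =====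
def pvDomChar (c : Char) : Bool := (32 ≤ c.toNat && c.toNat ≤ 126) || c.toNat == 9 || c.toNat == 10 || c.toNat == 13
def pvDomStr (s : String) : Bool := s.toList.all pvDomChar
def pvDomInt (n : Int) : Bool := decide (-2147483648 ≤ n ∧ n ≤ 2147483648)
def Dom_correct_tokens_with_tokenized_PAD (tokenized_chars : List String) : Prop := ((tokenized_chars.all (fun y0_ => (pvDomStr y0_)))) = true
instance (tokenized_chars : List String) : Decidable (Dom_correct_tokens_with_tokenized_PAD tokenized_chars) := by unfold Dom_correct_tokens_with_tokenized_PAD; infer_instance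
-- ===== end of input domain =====

-- B replaces A's token-by-token scan with a cross-iteration flag by chunked
-- rewriting: find the next "[" marker, copy the plain chunk before it wholesale,
-- then resolve the PAD block and its follower locally (objective: alternative).

-- ===== PORT A =====
-- the while loop of A: state = (index i, last_pad flag); appends become conses onto the remainder
def pvGoA (ts : List String) (i : Nat) (lastPad : Bool) : List String :=
  if h : i < ts.length then
    let next_char := ts[i]
    if next_char == "[" then
      -- i += 5; last_pad = True; then possibly consume a "|"
      if h2 : i + 5 < ts.length then
        if ts[i + 5] == "|" then "[PAD]" :: pvGoA ts (i + 6) false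
        else "[PAD]" :: pvGoA ts (i + 5) true
      else "[PAD]" :: pvGoA ts (i + 5) true
    else if lastPad then ("##" ++ next_char) :: pvGoA ts (i + 1) false
    else next_char :: pvGoA ts (i + 1) false
  else []
termination_by ts.length - i

def correct_tokens_with_tokenized_PAD (tokenized_chars : List String) : List String :=
  pvGoA tokenized_chars 0 false

-- ===== PORT B =====
-- Source B's while loop: state = (out accumulator, remaining suffix 'rest');
-- '"[" in rest' + rest.index('[') is index?; rest[:k] and rest[k+5:] are slices
def pvGoB (out rest : List String) : List String :=
  match hk : PySem.List.index? rest "[" with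
  | none => out ++ rest                                    -- no marker left: out.extend(rest)
  | some k =>
    let out2 := (out ++ PySem.List.slice rest none (some (k : Int))) ++ ["[PAD]"]
    match ht : PySem.List.slice rest (some ((k : Int) + 5)) none with
    | [] => pvGoB out2 []                                  -- rest = tail (empty)
    | t :: ts' =>
      if t == "|" then pvGoB out2 ts'                      -- drop the separator
      else if t != "[" then pvGoB (out2 ++ ["##" ++ t]) ts'  -- continuation piece
      else pvGoB out2 (t :: ts')                           -- next PAD starts immediately
termination_by rest.length
decreasing_by
  all_goals
    obtain ⟨hklt, -, -⟩ := PySem.List.getElem_of_index?_eq_some hk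
  · simpa using Nat.lt_of_le_of_lt (Nat.zero_le k) hklt
  all_goals
    have hlen : (PySem.List.slice rest (some ((k : Int) + 5)) none).length = rest.length - (k + 5) := by
      rw [show ((k : Int) + 5) = ((k + 5 : Nat) : Int) by push_cast; ring,
        PySem.List.slice_from_natCast]
      simp
    rw [ht] at hlen
    simp at hlen ⊢
    omega

def correct_tokens_with_tokenized_PAD_alt (tokenized_chars : List String) : List String :=
  pvGoB [] tokenized_chars

-- ===== PRECONDITION & SPEC =====
def Spec_correct_tokens_with_tokenized_PAD (tokenized_chars : List String) (out : List String) : Prop := out = correct_tokens_with_tokenized_PAD_alt tokenized_chars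
instance (tokenized_chars : List String) (out : List String) : Decidable (Spec_correct_tokens_with_tokenized_PAD tokenized_chars out) := by unfold Spec_correct_tokens_with_tokenized_PAD; infer_instance

-- ===== CLAIM (what is proved, stated in full; the proofs are below) =====
def Claim_equal_correct_tokens_with_tokenized_PAD : Prop := ∀ (tokenized_chars : List String), Dom_correct_tokens_with_tokenized_PAD tokenized_chars → Spec_correct_tokens_with_tokenized_PAD tokenized_chars (correct_tokens_with_tokenized_PAD tokenized_chars)

-- ===== LEMMAS AND PROOFS =====

-- past the end, A's loop yields nothing
theorem pvGoA_of_le (ts : List String) (i : Nat) (b : Bool) (h : ts.length ≤ i) :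
    pvGoA ts i b = [] := by
  rw [pvGoA]; simp [Nat.not_lt.mpr h]

-- on a "[" token A's loop emits "[PAD]" and the last_pad flag is irrelevant
theorem pvGoA_bracket (ts : List String) (i : Nat) (b : Bool)
    (hi : i < ts.length) (hb : ts[i] = "[") :
    pvGoA ts i b = "[PAD]" ::
      (if i + 5 < ts.length then
        (if h2 : i + 5 < ts.length then
          (if ts[i + 5]'h2 = "|" then pvGoA ts (i + 6) false else pvGoA ts (i + 5) true)
        else pvGoA ts (i + 5) true)
      else pvGoA ts (i + 5) true) := by
  rw [pvGoA, dif_pos hi]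
  simp only [hb, beq_self_eq_true, if_true]
  split_ifs with h2 h3 h4 h5 <;> simp_all

-- on a "[" token the last_pad flag is irrelevant
theorem pvGoA_pad_agnostic (ts : List String) (m : Nat)
    (h : m < ts.length) (hm : ts[m] = "[") : pvGoA ts m true = pvGoA ts m false := by
  conv_lhs => rw [pvGoA]
  conv_rhs => rw [pvGoA]
  simp [h, hm]

-- a run of k plain (non-"[") tokens is copied verbatim by A's loop
theorem pvGoA_copy (ts : List String) : ∀ (k i : Nat), i + k ≤ ts.length →
    (∀ j, j < k → ∀ (hj : i + j < ts.length), ts[i + j] ≠ "[") →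
    pvGoA ts i false = (ts.drop i).take k ++ pvGoA ts (i + k) false := by
  intro k
  induction k with
  | zero => intro i _ _; simp
  | succ k ih =>
    intro i hle hne
    have hi : i < ts.length := by omega
    have h0 : ts[i] ≠ "[" := by simpa using hne 0 (by omega) (by omega)
    have hrec := ih (i + 1) (by omega) (fun j hj hj2 => by
      have h' : i + 1 + j = i + (j + 1) := by omega
      simp only [h']
      exact hne (j + 1) (by omega) (by omega))
    rw [pvGoA, dif_pos hi]
    rw [if_neg (by simpa using h0), if_neg (by simp), hrec,
      List.drop_eq_getElem_cons hi, List.take_succ_cons,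
      show i + 1 + k = i + (k + 1) by omega]
    simp

-- B's loop on the empty suffix just returns the accumulator
theorem pvGoB_nil (out : List String) : pvGoB out [] = out := by
  rw [pvGoB]; simp

-- the main correspondence: B's chunked loop on the suffix equals out ++ A's scan
theorem pvGoB_eq (ts : List String) : ∀ (n i : Nat) (out : List String),
    ts.length - i ≤ n → pvGoB out (ts.drop i) = out ++ pvGoA ts i false := by
  intro n
  induction n with
  | zero =>
    intro i out h
    have hle : ts.length ≤ i := by omega
    rw [List.drop_eq_nil_of_le hle, pvGoA_of_le ts i false hle, pvGoB_nil, List.append_nil]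
  | succ n ih =>
    intro i out hfuel
    rcases hk : PySem.List.index? (ts.drop i) "[" with _ | k
    · -- no "[" in the suffix: A copies it verbatim
      by_cases hil : ts.length ≤ i
      · rw [List.drop_eq_nil_of_le hil, pvGoA_of_le ts i false hil, pvGoB_nil, List.append_nil]
      have hnotin : "[" ∉ ts.drop i := (PySem.List.index?_eq_none_iff _ _).mp hk
      have hcopy := pvGoA_copy ts (ts.length - i) i (by omega) (fun j hj hj2 => by
        have hj' : j < (ts.drop i).length := by simp; omega
        have hmem : ts[i + j] ∈ ts.drop i := by
          have := List.getElem_mem hj'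
          simpa [List.getElem_drop] using this
        exact fun heq => hnotin (heq ▸ hmem))
      rw [hcopy, pvGoA_of_le ts _ false (by omega)]
      rw [pvGoB]
      split
      · have htake : (ts.drop i).take (ts.length - i) = ts.drop i :=
          List.take_of_length_le (by simp)
        simp [htake]
      · next k' heq =>
        cases hk.symm.trans heq
    · -- next "[" at offset k in the suffix
      obtain ⟨hklt, hkget, hkpre⟩ := PySem.List.getElem_of_index?_eq_some hk
      rw [List.getElem_drop] at hkget
      have hkl : i + k < ts.length := by simp at hklt; omega
      have hcopy := pvGoA_copy ts k i (by omega) (fun j hj hj2 => by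
        have := hkpre j hj
        rwa [List.getElem_drop] at this)
      have hslice_from : PySem.List.slice (ts.drop i) (some ((k : Int) + 5)) none
          = ts.drop (i + k + 5) := by
        rw [show ((k : Int) + 5) = ((k + 5 : Nat) : Int) by push_cast; ring,
          PySem.List.slice_from_natCast, List.drop_drop]
        congr 1
      rw [pvGoB]
      split
      · next heq =>
        cases hk.symm.trans heq
      · next k' heq =>
        injection hk.symm.trans heq with hkk
        subst hkk
        rw [PySem.List.slice_to_natCast]
        split
        · next ht =>
          -- the PAD block runs to (or past) the end of the input
          rw [hslice_from] at ht
          have h5 : ts.length ≤ i + k + 5 := by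
            have := congrArg List.length ht
            simp at this
            omega
          rw [pvGoB_nil, hcopy, pvGoA_bracket ts (i + k) false hkl hkget,
            if_neg (by omega), pvGoA_of_le ts (i + k + 5) true (by omega)]
          simp
        · next t ts' ht =>
          rw [hslice_from] at ht
          have hm : i + k + 5 < ts.length := by
            have := congrArg List.length ht
            simp at this
            omega
          obtain ⟨ht1, ht2⟩ : ts[i + k + 5] = t ∧ ts.drop (i + k + 5 + 1) = ts' := by
            have hc := (List.drop_eq_getElem_cons hm).symm.trans ht
            exact ⟨by injection hc, by injection hc⟩
          rw [hcopy, pvGoA_bracket ts (i + k) false hkl hkget, if_pos hm, dif_pos hm, ht1]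
          by_cases hbar : t = "|"
          · -- the separator after the block is dropped by both
            rw [if_pos (by simp [hbar]), if_pos hbar,
              ← ht2, ih (i + k + 5 + 1) _ (by omega),
              show i + k + 5 + 1 = i + k + 6 by omega]
            simp
          · by_cases hlb : t = "["
            · -- another PAD block starts immediately
              rw [if_neg (by simp [hbar]), if_neg (by simp [hlb]), if_neg hbar,
                ← ht, ih (i + k + 5) _ (by omega),
                pvGoA_pad_agnostic ts (i + k + 5) hm (ht1.trans hlb)]
              simp
            · -- ordinary follower: the "##" continuation
              rw [if_neg (by simp [hbar]), if_pos (by simp [hlb]), if_neg hbar,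
                ← ht2, ih (i + k + 5 + 1) _ (by omega)]
              conv_rhs => rw [pvGoA]
              rw [dif_pos hm, if_neg (by simp [ht1, hlb]), if_pos rfl, ht1,
                show i + k + 5 + 1 = i + k + 6 by omega]
              simp

-- ===== VERDICT (by name: the statement is the Claim_ definition above) =====
theorem correct_tokens_with_tokenized_PAD_spec : Claim_equal_correct_tokens_with_tokenized_PAD := by
  intro ts _
  unfold Spec_correct_tokens_with_tokenized_PAD correct_tokens_with_tokenized_PAD correct_tokens_with_tokenized_PAD_alt
  have := pvGoB_eq ts ts.length 0 [] (by omega)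
  simpa using this.symm
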